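-- pv_equiv track=rewrite | github.com/lhg96/palm-analyzer | app.py | classify_lines_by_type
-- ===== SOURCE A (Python) =====
-- def classify_lines_by_type(lines):
--     """라인들을 타입별로 분류"""
--     line_counts = {
--         'major_vertical': 0,
--         'major_horizontal': 0,
--         'medium': 0,
--         'minor': 0
--     }
--
--     line_types = []
--
--     for line_data in lines:
--         line_type = line_data.get('type', 'minor')
--         if line_type in line_counts:
--             line_counts[line_type] += 1
--             if line_type not in line_types:
--                 line_types.append(line_type)
--
--     return line_counts, line_types
-- ===== SOURCE B (Python) =====
-- def classify_lines_by_type(lines):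
--     """라인들을 타입별로 분류"""
--     keys = ('major_vertical', 'major_horizontal', 'medium', 'minor')
--     valid = [d.get('type', 'minor') for d in lines if d.get('type', 'minor') in keys]
--     line_counts = {k: valid.count(k) for k in keys}
--     return line_counts, list(dict.fromkeys(valid))
-- ===== Notes on version B (the rewrite author's own statement) =====
-- stated objective: idiomatic
-- what changed: A's single loop threading two mutable accumulators (a counts dict and a seen-types list) is replaced by a declarative pipeline: one comprehension extracting the valid types, a per-key count() comprehension for the counts, and dict.fromkeys for the first-appearance dedup.
import Mathlib
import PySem

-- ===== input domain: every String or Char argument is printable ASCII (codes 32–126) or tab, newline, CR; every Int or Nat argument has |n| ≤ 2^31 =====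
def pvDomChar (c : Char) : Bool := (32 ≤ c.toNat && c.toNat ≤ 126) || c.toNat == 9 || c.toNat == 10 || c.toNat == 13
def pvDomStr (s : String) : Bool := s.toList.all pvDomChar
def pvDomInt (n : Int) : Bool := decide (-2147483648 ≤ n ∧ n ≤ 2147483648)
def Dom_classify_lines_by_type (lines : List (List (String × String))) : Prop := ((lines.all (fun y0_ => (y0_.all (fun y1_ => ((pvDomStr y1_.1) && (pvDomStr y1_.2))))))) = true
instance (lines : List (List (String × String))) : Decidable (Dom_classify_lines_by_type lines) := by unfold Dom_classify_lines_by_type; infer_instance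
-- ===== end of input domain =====

-- B replaces A's single loop over two mutable accumulators by a declarative pipeline
-- (extract valid types, count each of the four keys, dedup with dict.fromkeys); same cost, more idiomatic.

-- ===== PORT A =====
-- A's loop: state = (line_counts dict, line_types list); each line bumps the count and records first appearance.
def classify_lines_by_type (lines : List (List (String × String))) : (List (String × Int)) × List String :=
  let init : PySem.Dict String Int :=
    PySem.Dict.mk [("major_vertical", 0), ("major_horizontal", 0), ("medium", 0), ("minor", 0)]
  let res :=
    lines.foldl (fun (st : PySem.Dict String Int × List String) line_data =>
      let line_type := PySem.Dict.getD (PySem.Dict.mk line_data) "type" "minor"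
      if st.1.contains line_type then
        (st.1.modify line_type 0 (· + 1),
         if line_type ∈ st.2 then st.2 else st.2 ++ [line_type])
      else st) (init, [])
  (res.1.items, res.2)

-- ===== PORT B =====
def pvKeys : List String := ["major_vertical", "major_horizontal", "medium", "minor"]

def classify_lines_by_type_alt (lines : List (List (String × String))) : (List (String × Int)) × List String :=
  let valid := (lines.map (fun d => PySem.Dict.getD (PySem.Dict.mk d) "type" "minor")).filter
                 (fun t => pvKeys.contains t)
  (pvKeys.map (fun k => (k, (PySem.List.count valid k : Int))), PySem.List.dedup valid)

-- ===== PRECONDITION & SPEC =====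
def Spec_classify_lines_by_type (lines : List (List (String × String))) (out : (List (String × Int)) × List String) : Prop := out = classify_lines_by_type_alt lines
instance (lines : List (List (String × String))) (out : (List (String × Int)) × List String) : Decidable (Spec_classify_lines_by_type lines out) := by unfold Spec_classify_lines_by_type; infer_instance

-- ===== CLAIM (what is proved, stated in full; the proofs are below) =====
def Claim_equal_classify_lines_by_type : Prop := ∀ (lines : List (List (String × String))), Dom_classify_lines_by_type lines → Spec_classify_lines_by_type lines (classify_lines_by_type lines)

-- ===== LEMMAS AND PROOFS =====

-- the counts dict A maintains, characterised by the valid types seen so far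
def pvD (v : List String) : PySem.Dict String Int :=
  PySem.Dict.mk (pvKeys.map (fun k => (k, (v.count k : Int))))

lemma pvD_contains (v : List String) (t : String) :
    (pvD v).contains t = pvKeys.contains t := by
  unfold pvD pvKeys
  rw [PySem.Dict.contains_mk]
  simp only [List.any_map, List.contains_eq_any_beq]
  refine List.any_congr rfl ?_
  intro x
  simp [Function.comp, BEq.comm]

lemma pvD_modify (v : List String) (t : String) (ht : pvKeys.contains t = true) :
    (pvD v).modify t 0 (· + 1) = pvD (v ++ [t]) := by
  simp only [pvKeys, List.contains_eq_any_beq, List.any_cons, List.any_nil,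
    Bool.or_false, Bool.or_eq_true, beq_iff_eq] at ht
  rcases ht with h | h | h | h <;> subst h <;>
    simp [pvD, pvKeys, PySem.Dict.modify, PySem.Dict.insert, PySem.Dict.getD, PySem.Dict.get?,
      PySem.Dict.contains_mk, List.count_append, List.find?]

-- A's loop over the lines is the same loop over the extracted types
lemma pv_foldA (lines : List (List (String × String))) (st0 : PySem.Dict String Int × List String) :
    lines.foldl (fun st line_data =>
        let line_type := PySem.Dict.getD (PySem.Dict.mk line_data) "type" "minor"
        if st.1.contains line_type then
          (st.1.modify line_type 0 (· + 1),
           if line_type ∈ st.2 then st.2 else st.2 ++ [line_type])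
        else st) st0
      = (lines.map (fun d => PySem.Dict.getD (PySem.Dict.mk d) "type" "minor")).foldl
          (fun st t =>
            if st.1.contains t then
              (st.1.modify t 0 (· + 1), if t ∈ st.2 then st.2 else st.2 ++ [t])
            else st) st0 := by
  induction lines generalizing st0 with
  | nil => rfl
  | cons d rest ih => simp only [List.foldl_cons, List.map_cons, ih]

lemma pv_loopA (ts v : List String) :
    ts.foldl (fun (st : PySem.Dict String Int × List String) t =>
        if st.1.contains t then
          (st.1.modify t 0 (· + 1), if t ∈ st.2 then st.2 else st.2 ++ [t])
        else st) (pvD v, PySem.Set.ofList v)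
      = (pvD (v ++ ts.filter (fun t => pvKeys.contains t)),
         PySem.Set.ofList (v ++ ts.filter (fun t => pvKeys.contains t))) := by
  induction ts generalizing v with
  | nil => simp
  | cons t ts ih =>
    rw [List.foldl_cons]
    by_cases hk : pvKeys.contains t = true
    · have h2 : (if t ∈ PySem.Set.ofList v then PySem.Set.ofList v else PySem.Set.ofList v ++ [t])
          = PySem.Set.ofList (v ++ [t]) := by
        rw [PySem.Set.ofList_append_singleton, PySem.Set.add_eq_ite]
      simp only [pvD_contains, hk, if_true, pvD_modify v t hk, h2, ih (v ++ [t]),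
        List.filter_cons, List.append_assoc, List.singleton_append]
    · simp only [pvD_contains, hk, if_false, List.filter_cons, Bool.false_eq_true, ih v]

-- ===== VERDICT (by name: the statement is the Claim_ definition above) =====
theorem classify_lines_by_type_spec : Claim_equal_classify_lines_by_type := by
  intro lines _
  unfold Spec_classify_lines_by_type classify_lines_by_type classify_lines_by_type_alt
  dsimp only
  rw [pv_foldA]
  have hinit : (PySem.Dict.mk [("major_vertical", (0:Int)), ("major_horizontal", 0), ("medium", 0), ("minor", 0)],
      ([] : List String)) = (pvD [], PySem.Set.ofList []) := by
    unfold pvD pvKeys; rfl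
  rw [hinit, pv_loopA]
  simp [pvD, PySem.List.count_eq, PySem.List.dedup]
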